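-- pv_equiv track=rewrite | github.com/vamseeachanta/assetutilities | src/assetutilities/agent_os/commands/templates/composer.py | infer_agent_type
-- ===== SOURCE A (Python) =====
-- from typing import TYPE_CHECKING, List, Dict, Any, Optional
--
-- def infer_agent_type(module_context: Dict[str, Any]) -> str:
--     """Infer agent type from module context.
--
--     Args:
--         module_context: Context information
--
--     Returns:
--         Inferred agent type
--     """
--     # Check for engineering indicators
--     engineering_indicators = [
--         "has_code_files", "has_tests", "has_api", "language",
--         "framework", "database", "deployment"
--     ]
--
--     analysis_indicators = [
--         "has_data_files", "visualization", "statistics", "machine_learning",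
--         "data_processing", "jupyter_notebooks"
--     ]
--
--     documentation_indicators = [
--         "has_docs", "markdown_files", "api_documentation", "user_guides",
--         "tutorials", "wiki"
--     ]
--
--     infrastructure_indicators = [
--         "docker", "kubernetes", "ci_cd", "deployment", "monitoring",
--         "infrastructure_as_code", "cloud_provider"
--     ]
--
--     # Score each category
--     scores = {
--         "engineering": sum(1 for indicator in engineering_indicators if module_context.get(indicator)),
--         "analysis": sum(1 for indicator in analysis_indicators if module_context.get(indicator)),
--         "documentation": sum(1 for indicator in documentation_indicators if module_context.get(indicator)),
--         "infrastructure": sum(1 for indicator in infrastructure_indicators if module_context.get(indicator))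
--     }
--
--     # Return category with highest score, or general if tied
--     if max(scores.values()) == 0:
--         return "general-purpose"
--
--     return max(scores.items(), key=lambda x: x[1])[0]
-- ===== SOURCE B (Python) =====
-- # Inverted index: each indicator maps to the categories it scores ("deployment" scores two).
-- _INDEX = {
--     "has_code_files": ["engineering"], "has_tests": ["engineering"],
--     "has_api": ["engineering"], "language": ["engineering"],
--     "framework": ["engineering"], "database": ["engineering"],
--     "deployment": ["engineering", "infrastructure"],
--     "has_data_files": ["analysis"], "visualization": ["analysis"],
--     "statistics": ["analysis"], "machine_learning": ["analysis"],
--     "data_processing": ["analysis"], "jupyter_notebooks": ["analysis"],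
--     "has_docs": ["documentation"], "markdown_files": ["documentation"],
--     "api_documentation": ["documentation"], "user_guides": ["documentation"],
--     "tutorials": ["documentation"], "wiki": ["documentation"],
--     "docker": ["infrastructure"], "kubernetes": ["infrastructure"],
--     "ci_cd": ["infrastructure"], "monitoring": ["infrastructure"],
--     "infrastructure_as_code": ["infrastructure"], "cloud_provider": ["infrastructure"],
-- }
--
--
-- def infer_agent_type(module_context):
--     scores = {"engineering": 0, "analysis": 0, "documentation": 0, "infrastructure": 0}
--     for key, value in module_context.items():
--         if value:
--             for cat in _INDEX.get(key, ()):
--                 scores[cat] += 1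
--     best, best_score = "general-purpose", 0
--     for cat in ("engineering", "analysis", "documentation", "infrastructure"):
--         if scores[cat] > best_score:
--             best, best_score = cat, scores[cat]
--     return best
-- ===== Notes on version B (the rewrite author's own statement) =====
-- stated objective: alternative
-- what changed: A scans the context four times, once per category indicator list, then takes a key-maximum over a scores dict; B builds a static inverted indicator-to-categories index ('deployment' maps to two categories) and makes a single pass over the context, incrementing the categories of each truthy key, then picks the first maximal category in fixed order.
import Mathlib
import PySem

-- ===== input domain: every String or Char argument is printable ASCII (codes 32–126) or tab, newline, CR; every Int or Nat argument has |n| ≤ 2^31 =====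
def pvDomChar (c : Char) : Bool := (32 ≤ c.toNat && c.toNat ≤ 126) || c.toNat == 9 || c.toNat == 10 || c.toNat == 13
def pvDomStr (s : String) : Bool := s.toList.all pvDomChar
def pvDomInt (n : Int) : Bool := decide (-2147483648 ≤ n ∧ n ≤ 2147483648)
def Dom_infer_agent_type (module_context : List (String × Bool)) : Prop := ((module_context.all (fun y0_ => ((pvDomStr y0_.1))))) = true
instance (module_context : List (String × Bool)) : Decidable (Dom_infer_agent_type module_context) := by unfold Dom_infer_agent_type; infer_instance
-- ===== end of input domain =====

-- B replaces A's four per-category scans of the context with one pass over the context driven by an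
-- inverted indicator→categories index (objective: alternative decomposition, same asymptotic cost).

-- ===== PORT A =====
def engineering_indicators : List String :=
  ["has_code_files", "has_tests", "has_api", "language", "framework", "database", "deployment"]
def analysis_indicators : List String :=
  ["has_data_files", "visualization", "statistics", "machine_learning", "data_processing", "jupyter_notebooks"]
def documentation_indicators : List String :=
  ["has_docs", "markdown_files", "api_documentation", "user_guides", "tutorials", "wiki"]
def infrastructure_indicators : List String :=
  ["docker", "kubernetes", "ci_cd", "deployment", "monitoring", "infrastructure_as_code", "cloud_provider"]

-- A's generator expression 'sum(1 for indicator in inds if module_context.get(indicator))'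
def pySum1If (d : PySem.Dict String Bool) (inds : List String) : Int :=
  (inds.map (fun ind => if d.getD ind false = true then (1 : Int) else 0)).sum

def infer_agent_type (module_context : List (String × Bool)) : String :=
  let d := PySem.Dict.mk module_context
  let scores : List (String × Int) :=
    [("engineering", pySum1If d engineering_indicators),
     ("analysis", pySum1If d analysis_indicators),
     ("documentation", pySum1If d documentation_indicators),
     ("infrastructure", pySum1If d infrastructure_indicators)]
  -- max(scores.values()); scores is a 4-element literal so max? is always 'some' (getD default unreachable)
  if (PySem.List.max? (scores.map (fun x => x.2)) (fun v => v)).getD 0 = 0 then "general-purpose"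
  else
    match PySem.List.max? scores (fun x => x.2) with
    | some p => p.1
    | none => "general-purpose"   -- unreachable

-- ===== PORT B =====
-- Source B's _INDEX dict, looked up with .get(key, ())
def pvIndex (k : String) : List String :=
  if k == "has_code_files" then ["engineering"]
  else if k == "has_tests" then ["engineering"]
  else if k == "has_api" then ["engineering"]
  else if k == "language" then ["engineering"]
  else if k == "framework" then ["engineering"]
  else if k == "database" then ["engineering"]
  else if k == "deployment" then ["engineering", "infrastructure"]
  else if k == "has_data_files" then ["analysis"]
  else if k == "visualization" then ["analysis"]
  else if k == "statistics" then ["analysis"]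
  else if k == "machine_learning" then ["analysis"]
  else if k == "data_processing" then ["analysis"]
  else if k == "jupyter_notebooks" then ["analysis"]
  else if k == "has_docs" then ["documentation"]
  else if k == "markdown_files" then ["documentation"]
  else if k == "api_documentation" then ["documentation"]
  else if k == "user_guides" then ["documentation"]
  else if k == "tutorials" then ["documentation"]
  else if k == "wiki" then ["documentation"]
  else if k == "docker" then ["infrastructure"]
  else if k == "kubernetes" then ["infrastructure"]
  else if k == "ci_cd" then ["infrastructure"]
  else if k == "monitoring" then ["infrastructure"]
  else if k == "infrastructure_as_code" then ["infrastructure"]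
  else if k == "cloud_provider" then ["infrastructure"]
  else []

-- Source B's fixed four-key 'scores' dict as a quadruple (engineering, analysis, documentation, infrastructure)
def pvBump (s : Nat × Nat × Nat × Nat) (cat : String) : Nat × Nat × Nat × Nat :=
  if cat == "engineering" then (s.1 + 1, s.2.1, s.2.2.1, s.2.2.2)
  else if cat == "analysis" then (s.1, s.2.1 + 1, s.2.2.1, s.2.2.2)
  else if cat == "documentation" then (s.1, s.2.1, s.2.2.1 + 1, s.2.2.2)
  else (s.1, s.2.1, s.2.2.1, s.2.2.2 + 1)

def pvStep (s : Nat × Nat × Nat × Nat) (kv : String × Bool) : Nat × Nat × Nat × Nat :=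
  if kv.2 then (pvIndex kv.1).foldl pvBump s else s

def infer_agent_type_alt (module_context : List (String × Bool)) : String :=
  let s := module_context.foldl pvStep (0, 0, 0, 0)
  (([("engineering", s.1), ("analysis", s.2.1), ("documentation", s.2.2.1), ("infrastructure", s.2.2.2)]
      : List (String × Nat)).foldl
     (fun best c => if c.2 > best.2 then c else best) ("general-purpose", 0)).1

-- ===== PRECONDITION & SPEC =====
-- Pre_ excludes association lists with duplicate keys: A's Python argument is a dict, which cannot
-- contain a key twice, so such lists represent no Python input (dict(...) would collapse them).
def Pre_infer_agent_type (module_context : List (String × Bool)) : Prop :=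
  (module_context.map Prod.fst).Nodup
instance (module_context : List (String × Bool)) : Decidable (Pre_infer_agent_type module_context) := by
  unfold Pre_infer_agent_type; infer_instance

def pvWitness_infer_agent_type : (List (String × Bool)) :=
  [("docker", true), ("has_docs", false), ("has_tests", true)]

def Spec_infer_agent_type (module_context : List (String × Bool)) (out : String) : Prop := out = infer_agent_type_alt module_context
instance (module_context : List (String × Bool)) (out : String) : Decidable (Spec_infer_agent_type module_context out) := by unfold Spec_infer_agent_type; infer_instance

-- ===== CLAIM (what is proved, stated in full; the proofs are below) =====
def Claim_equal_infer_agent_type : Prop := ∀ (module_context : List (String × Bool)), Dom_infer_agent_type module_context → Pre_infer_agent_type module_context → Spec_infer_agent_type module_context (infer_agent_type module_context)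

-- ===== LEMMAS AND PROOFS =====

def pvAdd (s t : Nat × Nat × Nat × Nat) : Nat × Nat × Nat × Nat :=
  (s.1 + t.1, s.2.1 + t.2.1, s.2.2.1 + t.2.2.1, s.2.2.2 + t.2.2.2)

lemma pvBump_add (s t : Nat × Nat × Nat × Nat) (c : String) :
    pvBump (pvAdd s t) c = pvAdd s (pvBump t c) := by
  obtain ⟨a, b, cc, d⟩ := t
  simp only [pvBump, pvAdd]
  split_ifs <;> simp [Nat.add_assoc]

lemma foldl_pvBump_add (cats : List String) (s t : Nat × Nat × Nat × Nat) :
    cats.foldl pvBump (pvAdd s t) = pvAdd s (cats.foldl pvBump t) := by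
  induction cats generalizing t with
  | nil => rfl
  | cons c cats ih => simp [List.foldl, pvBump_add, ih]

lemma pvStep_add (s t : Nat × Nat × Nat × Nat) (kv : String × Bool) :
    pvStep (pvAdd s t) kv = pvAdd s (pvStep t kv) := by
  unfold pvStep
  split_ifs <;> simp [foldl_pvBump_add]

lemma pvAdd_zero (s : Nat × Nat × Nat × Nat) : pvAdd s (0, 0, 0, 0) = s := by
  simp [pvAdd]

lemma foldl_pvStep_add (l : List (String × Bool)) (s t : Nat × Nat × Nat × Nat) :
    l.foldl pvStep (pvAdd s t) = pvAdd s (l.foldl pvStep t) := by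
  induction l generalizing t with
  | nil => rfl
  | cons kv l ih => simp [List.foldl, pvStep_add, ih]

set_option maxHeartbeats 1600000 in
lemma pvIndex_counts (k : String) :
    (pvIndex k).foldl pvBump (0, 0, 0, 0) =
      (engineering_indicators.count k, analysis_indicators.count k,
       documentation_indicators.count k, infrastructure_indicators.count k) := by
  unfold pvIndex
  by_cases h1 : k = "has_code_files"
  · subst h1; decide
  rw [if_neg (show ¬((k == "has_code_files") = true) from by simp [h1])]
  by_cases h2 : k = "has_tests"
  · subst h2; decide
  rw [if_neg (show ¬((k == "has_tests") = true) from by simp [h2])]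
  by_cases h3 : k = "has_api"
  · subst h3; decide
  rw [if_neg (show ¬((k == "has_api") = true) from by simp [h3])]
  by_cases h4 : k = "language"
  · subst h4; decide
  rw [if_neg (show ¬((k == "language") = true) from by simp [h4])]
  by_cases h5 : k = "framework"
  · subst h5; decide
  rw [if_neg (show ¬((k == "framework") = true) from by simp [h5])]
  by_cases h6 : k = "database"
  · subst h6; decide
  rw [if_neg (show ¬((k == "database") = true) from by simp [h6])]
  by_cases h7 : k = "deployment"
  · subst h7; decide
  rw [if_neg (show ¬((k == "deployment") = true) from by simp [h7])]
  by_cases h8 : k = "has_data_files"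
  · subst h8; decide
  rw [if_neg (show ¬((k == "has_data_files") = true) from by simp [h8])]
  by_cases h9 : k = "visualization"
  · subst h9; decide
  rw [if_neg (show ¬((k == "visualization") = true) from by simp [h9])]
  by_cases h10 : k = "statistics"
  · subst h10; decide
  rw [if_neg (show ¬((k == "statistics") = true) from by simp [h10])]
  by_cases h11 : k = "machine_learning"
  · subst h11; decide
  rw [if_neg (show ¬((k == "machine_learning") = true) from by simp [h11])]
  by_cases h12 : k = "data_processing"
  · subst h12; decide
  rw [if_neg (show ¬((k == "data_processing") = true) from by simp [h12])]
  by_cases h13 : k = "jupyter_notebooks"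
  · subst h13; decide
  rw [if_neg (show ¬((k == "jupyter_notebooks") = true) from by simp [h13])]
  by_cases h14 : k = "has_docs"
  · subst h14; decide
  rw [if_neg (show ¬((k == "has_docs") = true) from by simp [h14])]
  by_cases h15 : k = "markdown_files"
  · subst h15; decide
  rw [if_neg (show ¬((k == "markdown_files") = true) from by simp [h15])]
  by_cases h16 : k = "api_documentation"
  · subst h16; decide
  rw [if_neg (show ¬((k == "api_documentation") = true) from by simp [h16])]
  by_cases h17 : k = "user_guides"
  · subst h17; decide
  rw [if_neg (show ¬((k == "user_guides") = true) from by simp [h17])]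
  by_cases h18 : k = "tutorials"
  · subst h18; decide
  rw [if_neg (show ¬((k == "tutorials") = true) from by simp [h18])]
  by_cases h19 : k = "wiki"
  · subst h19; decide
  rw [if_neg (show ¬((k == "wiki") = true) from by simp [h19])]
  by_cases h20 : k = "docker"
  · subst h20; decide
  rw [if_neg (show ¬((k == "docker") = true) from by simp [h20])]
  by_cases h21 : k = "kubernetes"
  · subst h21; decide
  rw [if_neg (show ¬((k == "kubernetes") = true) from by simp [h21])]
  by_cases h22 : k = "ci_cd"
  · subst h22; decide
  rw [if_neg (show ¬((k == "ci_cd") = true) from by simp [h22])]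
  by_cases h23 : k = "monitoring"
  · subst h23; decide
  rw [if_neg (show ¬((k == "monitoring") = true) from by simp [h23])]
  by_cases h24 : k = "infrastructure_as_code"
  · subst h24; decide
  rw [if_neg (show ¬((k == "infrastructure_as_code") = true) from by simp [h24])]
  by_cases h25 : k = "cloud_provider"
  · subst h25; decide
  rw [if_neg (show ¬((k == "cloud_provider") = true) from by simp [h25])]
  simp only [List.foldl_nil]
  refine Prod.ext ?_ (Prod.ext ?_ (Prod.ext ?_ ?_)) <;>
    · show (0:Nat) = _
      rw [eq_comm, List.count_eq_zero]
      simp [engineering_indicators, analysis_indicators, documentation_indicators,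
        infrastructure_indicators]
      tauto

lemma getD_mk_cons (k i : String) (v : Bool) (rest : List (String × Bool)) :
    (PySem.Dict.mk ((k, v) :: rest)).getD i false =
      if k = i then v else (PySem.Dict.mk rest).getD i false := by
  simp only [PySem.Dict.getD, PySem.Dict.get?, List.find?]
  by_cases h : k = i
  · simp [h]
  · rw [show (k == i) = false from by simp [h], if_neg h]

lemma getD_mk_not_mem (k : String) (rest : List (String × Bool))
    (h : k ∉ rest.map Prod.fst) : (PySem.Dict.mk rest).getD k false = false := by
  induction rest with
  | nil => rfl
  | cons p rest ih =>
    obtain ⟨a, b⟩ := p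
    rw [getD_mk_cons]
    have h1 : ¬ a = k := fun hh => h (by simp [hh])
    have h2 : k ∉ rest.map Prod.fst := fun hh => h (by simp; right; exact (by simpa using hh))
    simp [h1, ih h2]

lemma pySum1If_cons (inds : List String) (k : String) (v : Bool) (rest : List (String × Bool))
    (h : (PySem.Dict.mk rest).getD k false = false) :
    pySum1If (PySem.Dict.mk ((k, v) :: rest)) inds =
      pySum1If (PySem.Dict.mk rest) inds + (inds.count k : Int) * (if v then 1 else 0) := by
  induction inds with
  | nil => simp [pySum1If]
  | cons i inds ih =>
    simp only [pySum1If, List.map, List.sum_cons] at ih ⊢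
    rw [getD_mk_cons]
    by_cases hk : k = i
    · subst hk
      rw [if_pos rfl, List.count_cons_self, h, ih]
      push_cast
      cases v <;> simp <;> try ring
    · rw [if_neg hk, List.count_cons_of_ne (fun hh => hk hh.symm), ih]
      ring

lemma pySum1If_nil (inds : List String) : pySum1If (PySem.Dict.mk []) inds = 0 := by
  induction inds with
  | nil => rfl
  | cons i inds _ => simp [pySum1If, PySem.Dict.getD, PySem.Dict.get?]

lemma scores_eq (ctx : List (String × Bool)) (h : (ctx.map Prod.fst).Nodup) :
    ctx.foldl pvStep (0, 0, 0, 0) =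
      ((pySum1If (PySem.Dict.mk ctx) engineering_indicators).toNat,
       (pySum1If (PySem.Dict.mk ctx) analysis_indicators).toNat,
       (pySum1If (PySem.Dict.mk ctx) documentation_indicators).toNat,
       (pySum1If (PySem.Dict.mk ctx) infrastructure_indicators).toNat) ∧
    0 ≤ pySum1If (PySem.Dict.mk ctx) engineering_indicators ∧
    0 ≤ pySum1If (PySem.Dict.mk ctx) analysis_indicators ∧
    0 ≤ pySum1If (PySem.Dict.mk ctx) documentation_indicators ∧
    0 ≤ pySum1If (PySem.Dict.mk ctx) infrastructure_indicators := by
  induction ctx with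
  | nil => refine ⟨?_, ?_, ?_, ?_, ?_⟩ <;> simp [pySum1If_nil]
  | cons kv ctx ih =>
    obtain ⟨k, v⟩ := kv
    rw [List.map_cons, List.nodup_cons] at h
    obtain ⟨hk, hnd⟩ := h
    obtain ⟨hfold, he, ha, hd, hi⟩ := ih hnd
    have hrest := getD_mk_not_mem k ctx hk
    have hE := pySum1If_cons engineering_indicators k v ctx hrest
    have hA := pySum1If_cons analysis_indicators k v ctx hrest
    have hD := pySum1If_cons documentation_indicators k v ctx hrest
    have hI := pySum1If_cons infrastructure_indicators k v ctx hrest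
    have hstep2 : List.foldl pvStep (0, 0, 0, 0) ((k, v) :: ctx) =
        pvAdd (pvStep (0, 0, 0, 0) (k, v)) (List.foldl pvStep (0, 0, 0, 0) ctx) := by
      rw [List.foldl_cons]
      have h2 := foldl_pvStep_add ctx (pvStep (0, 0, 0, 0) (k, v)) (0, 0, 0, 0)
      rwa [pvAdd_zero] at h2
    have hstepv : pvStep (0, 0, 0, 0) (k, v) =
        (if v then (engineering_indicators.count k, analysis_indicators.count k,
          documentation_indicators.count k, infrastructure_indicators.count k)
         else (0, 0, 0, 0)) := by
      unfold pvStep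
      cases v <;> simp [pvIndex_counts]
    refine ⟨?_, ?_, ?_, ?_, ?_⟩
    · show List.foldl pvStep (0, 0, 0, 0) ((k, v) :: ctx) = _
      rw [hstep2, hfold, hstepv]
      cases v <;>
        simp only [if_true, pvAdd, Prod.ext_iff] <;>
        refine ⟨?_, ?_, ?_, ?_⟩ <;>
        simp only [hE, hA, hD, hI] <;>
        simp <;> omega
    · rw [hE]; cases v <;> simp <;> omega
    · rw [hA]; cases v <;> simp <;> omega
    · rw [hD]; cases v <;> simp <;> omega
    · rw [hI]; cases v <;> simp <;> omega

lemma select_eq (e a d i : Nat) :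
    (if (PySem.List.max?
          (([("engineering", (e : Int)), ("analysis", (a : Int)),
             ("documentation", (d : Int)), ("infrastructure", (i : Int))] : List (String × Int)).map
            (fun x => x.2)) (fun v => v)).getD 0 = 0 then "general-purpose"
     else
       match PySem.List.max?
          ([("engineering", (e : Int)), ("analysis", (a : Int)),
            ("documentation", (d : Int)), ("infrastructure", (i : Int))] : List (String × Int))
          (fun x => x.2) with
       | some p => p.1
       | none => "general-purpose")
    = (([("engineering", e), ("analysis", a), ("documentation", d), ("infrastructure", i)]
        : List (String × Nat)).foldl
        (fun best c => if c.2 > best.2 then c else best) ("general-purpose", 0)).1 := by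
  simp only [List.map, PySem.List.max?, List.foldl]
  split_ifs <;> simp_all
  all_goals try omega
  all_goals try (split_ifs at * <;> simp_all)
  all_goals try (split_ifs at * <;> simp_all)
  all_goals try omega

-- ===== VERDICT (by name: the statement is the Claim_ definition above) =====
theorem infer_agent_type_spec : Claim_equal_infer_agent_type := by
  intro mc _ hpre
  unfold Spec_infer_agent_type
  obtain ⟨hfold, he, ha, hd, hi⟩ := scores_eq mc hpre
  unfold infer_agent_type infer_agent_type_alt
  rw [hfold]
  have := select_eq (pySum1If (PySem.Dict.mk mc) engineering_indicators).toNat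
    (pySum1If (PySem.Dict.mk mc) analysis_indicators).toNat
    (pySum1If (PySem.Dict.mk mc) documentation_indicators).toNat
    (pySum1If (PySem.Dict.mk mc) infrastructure_indicators).toNat
  rw [Int.toNat_of_nonneg he, Int.toNat_of_nonneg ha, Int.toNat_of_nonneg hd,
      Int.toNat_of_nonneg hi] at this
  exact this.symm ▸ rfl
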